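-- pv_equiv track=rewrite | github.com/TauricResearch/TradingAgents | tradingagents/web/app.py | _stage_status
-- ===== SOURCE A (Python) =====
-- def _stage_status(statuses: list[str]) -> str:
--     if not statuses:
--         return "pending"
--     if any(status == "failed" for status in statuses):
--         return "failed"
--     if all(status == "completed" for status in statuses):
--         return "completed"
--     if any(status in {"in_progress", "running"} for status in statuses):
--         return "in_progress"
--     return "pending"
-- ===== SOURCE B (Python) =====
-- def _stage_status(statuses: list[str]) -> str:
--     rank = {"failed": 3, "in_progress": 2, "running": 2, "completed": 0}
--     name = {3: "failed", 2: "in_progress", 1: "pending", 0: "completed"}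
--     m = -1
--     for status in statuses:
--         r = rank.get(status, 1)
--         if r > m:
--             m = r
--     return name.get(m, "pending")
-- ===== Notes on version B (the rewrite author's own statement) =====
-- stated objective: alternative
-- what changed: Replaces the four staged any/all scans by a single fold that reduces the list to one numeric severity (max of per-status ranks failed=3, in_progress/running=2, other=1, completed=0, empty=-1) and a final table lookup; the empty-list guard disappears because the empty maximum -1 maps to 'pending'.
import Mathlib
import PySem

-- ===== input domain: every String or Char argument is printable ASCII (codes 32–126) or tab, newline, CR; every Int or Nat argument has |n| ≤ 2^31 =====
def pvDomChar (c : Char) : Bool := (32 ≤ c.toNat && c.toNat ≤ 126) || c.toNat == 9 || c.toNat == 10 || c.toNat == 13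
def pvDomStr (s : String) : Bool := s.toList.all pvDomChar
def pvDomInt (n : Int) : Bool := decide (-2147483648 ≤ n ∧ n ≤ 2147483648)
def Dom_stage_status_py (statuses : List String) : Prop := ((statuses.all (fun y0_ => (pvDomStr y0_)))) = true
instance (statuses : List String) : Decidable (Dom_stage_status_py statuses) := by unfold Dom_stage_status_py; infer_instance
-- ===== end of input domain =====

-- B replaces A's four staged any/all scans by a single max-severity fold over numeric ranks plus a table lookup (alternative decomposition, same cost).


-- ===== PORT A =====
def stage_status_py (statuses : List String) : String :=
  if statuses = [] then "pending"
  else if statuses.any (fun status => status == "failed") then "failed"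
  else if statuses.all (fun status => status == "completed") then "completed"
  else if statuses.any (fun status =>
      PySem.Set.contains (PySem.Set.ofList ["in_progress", "running"]) status) then "in_progress"
  else "pending"

-- ===== PORT B =====
def pvRankD : PySem.Dict String Int :=
  PySem.Dict.ofList [("failed", 3), ("in_progress", 2), ("running", 2), ("completed", 0)]

def pvNameD : PySem.Dict Int String :=
  PySem.Dict.ofList [(3, "failed"), (2, "in_progress"), (1, "pending"), (0, "completed")]

def stage_status_py_alt (statuses : List String) : String :=
  let m : Int := statuses.foldl
    (fun m status =>
      let r := pvRankD.getD status 1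
      if r > m then r else m) (-1)
  pvNameD.getD m "pending"

-- ===== PRECONDITION & SPEC =====
def Spec_stage_status_py (statuses : List String) (out : String) : Prop := out = stage_status_py_alt statuses
instance (statuses : List String) (out : String) : Decidable (Spec_stage_status_py statuses out) := by unfold Spec_stage_status_py; infer_instance

-- ===== CLAIM (what is proved, stated in full; the proofs are below) =====
def Claim_equal_stage_status_py : Prop := ∀ (statuses : List String), Dom_stage_status_py statuses → Spec_stage_status_py statuses (stage_status_py statuses)

-- ===== LEMMAS AND PROOFS =====

-- B's fold step, named for the proofs (definitionally equal to the lambda in the port)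
def pvStep (m : Int) (status : String) : Int :=
  if pvRankD.getD status 1 > m then pvRankD.getD status 1 else m

theorem pvStep_eq : (fun m status =>
    let r := pvRankD.getD status 1
    if r > m then r else m) = pvStep := rfl

-- the per-status rank, unfolded
theorem rank_eq (s : String) :
    pvRankD.getD s 1 =
      if s = "failed" then 3
      else if s = "in_progress" then 2
      else if s = "running" then 2
      else if s = "completed" then 0 else 1 := by
  have hmk : pvRankD = PySem.Dict.mk
      [("failed", 3), ("in_progress", 2), ("running", 2), ("completed", 0)] := by decide
  by_cases h1 : s = "failed"
  · subst h1; decide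
  by_cases h2 : s = "in_progress"
  · subst h2; decide
  by_cases h3 : s = "running"
  · subst h3; decide
  by_cases h4 : s = "completed"
  · subst h4; decide
  rw [hmk]
  simp only [PySem.Dict.getD, PySem.Dict.get?_mk_cons, beq_iff_eq]
  rw [if_neg (fun h => h1 h.symm), if_neg (fun h => h2 h.symm),
      if_neg (fun h => h3 h.symm), if_neg (fun h => h4 h.symm),
      if_neg h1, if_neg h2, if_neg h3, if_neg h4]
  simp [PySem.Dict.get?]

theorem rank_bounds (s : String) : 0 ≤ pvRankD.getD s 1 ∧ pvRankD.getD s 1 ≤ 3 := by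
  rw [rank_eq]; split_ifs <;> omega

theorem foldl_step_mem (xs : List String) : ∀ a : Int,
    xs.foldl pvStep a = a ∨ ∃ x ∈ xs, xs.foldl pvStep a = pvRankD.getD x 1 := by
  induction xs with
  | nil => intro a; left; rfl
  | cons x xs ih =>
    intro a
    rw [List.foldl_cons]
    rcases ih (pvStep a x) with h | ⟨y, hy, hv⟩
    · rw [h]
      unfold pvStep
      split_ifs with hgt
      · exact Or.inr ⟨x, List.mem_cons_self, rfl⟩
      · exact Or.inl rfl
    · exact Or.inr ⟨y, List.mem_cons_of_mem _ hy, hv⟩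

theorem foldl_step_ub (xs : List String) : ∀ a : Int,
    a ≤ xs.foldl pvStep a ∧ ∀ x ∈ xs, pvRankD.getD x 1 ≤ xs.foldl pvStep a := by
  induction xs with
  | nil => intro a; exact ⟨le_refl _, by simp⟩
  | cons x xs ih =>
    intro a
    have h := ih (pvStep a x)
    have hstep : a ≤ pvStep a x ∧ pvRankD.getD x 1 ≤ pvStep a x := by
      unfold pvStep; split_ifs <;> omega
    rw [List.foldl_cons]
    refine ⟨le_trans hstep.1 h.1, ?_⟩
    intro y hy
    rcases List.mem_cons.mp hy with rfl | hy'
    · exact le_trans hstep.2 h.1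
    · exact h.2 y hy'

-- A = B, by pinning down the value of B's fold in each of A's branches
theorem stage_status_agree (statuses : List String) :
    stage_status_py statuses = stage_status_py_alt statuses := by
  by_cases hnil : statuses = []
  · subst hnil; rfl
  have halt : stage_status_py_alt statuses
      = pvNameD.getD (statuses.foldl pvStep (-1)) "pending" := by
    simp only [stage_status_py_alt]; rw [pvStep_eq]
  set M := statuses.foldl pvStep (-1) with hM
  have hub := foldl_step_ub statuses (-1)
  have hmem := foldl_step_mem statuses (-1)
  rw [← hM] at hub hmem
  have hMle3 : M ≤ 3 := by
    rcases hmem with h | ⟨x, _, h⟩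
    · omega
    · have := (rank_bounds x).2; omega
  by_cases hfail : statuses.any (fun status => status == "failed")
  · -- some "failed": M = 3
    rcases List.any_eq_true.mp hfail with ⟨x, hx, hxf⟩
    have hx3 : pvRankD.getD x 1 = 3 := by rw [rank_eq]; simp [beq_iff_eq.mp hxf]
    have hM3 : M = 3 := le_antisymm hMle3 (hx3 ▸ hub.2 x hx)
    rw [halt, hM3]
    simp only [stage_status_py, if_neg hnil, if_pos hfail]
    decide
  · have hnofail : ∀ x ∈ statuses, x ≠ "failed" := by
      intro x hx hc
      exact hfail (List.any_eq_true.mpr ⟨x, hx, by simp [hc]⟩)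
    by_cases hcomp : statuses.all (fun status => status == "completed")
    · -- all "completed", nonempty: M = 0
      rcases List.exists_mem_of_ne_nil statuses hnil with ⟨x0, hx0⟩
      have hall := List.all_eq_true.mp hcomp
      have h0 : pvRankD.getD x0 1 = 0 := by
        have := beq_iff_eq.mp (hall x0 hx0)
        rw [rank_eq]; simp [this]
      have hMge : 0 ≤ M := h0 ▸ hub.2 x0 hx0
      have hMle : M ≤ 0 := by
        rcases hmem with h | ⟨x, hx, h⟩
        · omega
        · have := beq_iff_eq.mp (hall x hx)
          rw [h, rank_eq]; simp [this]
      have hM0 : M = 0 := le_antisymm hMle hMge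
      rw [halt, hM0]
      simp only [stage_status_py, if_neg hnil, if_neg hfail, if_pos hcomp]
      decide
    · by_cases hrun : statuses.any (fun status =>
          PySem.Set.contains (PySem.Set.ofList ["in_progress", "running"]) status)
      · -- no "failed", some in_progress/running: M = 2
        rcases List.any_eq_true.mp hrun with ⟨x, hx, hxr⟩
        have hxir : x = "in_progress" ∨ x = "running" := by
          have := (PySem.Set.contains_iff _ _).mp hxr
          simpa [PySem.Set.mem_ofList] using this
        have hx2 : pvRankD.getD x 1 = 2 := by
          rw [rank_eq]; rcases hxir with rfl | rfl <;> simp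
        have hMge : 2 ≤ M := hx2 ▸ hub.2 x hx
        have hMle : M ≤ 2 := by
          rcases hmem with h | ⟨y, hy, h⟩
          · omega
          · rw [h, rank_eq]
            have := hnofail y hy
            split_ifs <;> simp_all
        have hM2 : M = 2 := le_antisymm hMle hMge
        rw [halt, hM2]
        simp only [stage_status_py, if_neg hnil, if_neg hfail, if_neg hcomp, if_pos hrun]
        decide
      · -- no failed/in_progress/running, not all completed: M = 1
        have hnorun : ∀ x ∈ statuses, x ≠ "in_progress" ∧ x ≠ "running" := by
          intro x hx
          constructor <;> intro hc <;>
            exact hrun (List.any_eq_true.mpr ⟨x, hx, by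
              apply (PySem.Set.contains_iff _ _).mpr
              simp [PySem.Set.mem_ofList, hc]⟩)
        have hnotall : ∃ x ∈ statuses, x ≠ "completed" := by
          by_contra h
          push Not at h
          exact hcomp (List.all_eq_true.mpr fun x hx => beq_iff_eq.mpr (h x hx))
        rcases hnotall with ⟨x0, hx0, hx0c⟩
        have h1 : pvRankD.getD x0 1 = 1 := by
          rw [rank_eq]
          have := hnofail x0 hx0
          have := hnorun x0 hx0
          simp_all
        have hMge : 1 ≤ M := h1 ▸ hub.2 x0 hx0
        have hMle : M ≤ 1 := by
          rcases hmem with h | ⟨y, hy, h⟩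
          · omega
          · rw [h, rank_eq]
            have := hnofail y hy
            have := hnorun y hy
            split_ifs <;> simp_all
        have hM1 : M = 1 := le_antisymm hMle hMge
        rw [halt, hM1]
        simp only [stage_status_py, if_neg hnil, if_neg hfail, if_neg hcomp, if_neg hrun]
        decide

-- ===== VERDICT (by name: the statement is the Claim_ definition above) =====
theorem stage_status_py_spec : Claim_equal_stage_status_py := by
  intro statuses _
  unfold Spec_stage_status_py
  exact stage_status_agree statuses
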